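-- pv_equiv track=rewrite | github.com/AlvieSpurlock/MathCore | MathCore/MathTypes/Advanced/Topology.py | IsHomeomorphism
-- ===== SOURCE A (Python) =====
-- def _fs(s):
--     """Convert any iterable to frozenset."""
--     return frozenset(s)
--
-- def _is_open(U, open_sets):
--     """True iff U (as frozenset) belongs to the topology."""
--     return _fs(U) in [_fs(o) for o in open_sets]
--
-- def IsContinuous(f, X_open_sets, Y_open_sets):
--     for V in Y_open_sets:
--         # Preimage f⁻¹(V) = {x ∈ X | f(x) ∈ V}
--         V_fs     = _fs(V)
--         preimage = _fs(x for x, fx in f.items() if fx in V_fs)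
--         if not _is_open(preimage, X_open_sets):
--             return False                                       # Preimage not open → discontinuous
--     return True                                               # All preimages open → continuous
--
-- def IsHomeomorphism(f, X_points, X_open_sets, Y_points, Y_open_sets):
--     # Bijectivity
--     domain   = set(f.keys())
--     codomain = set(f.values())
--     if domain != _fs(X_points) or codomain != _fs(Y_points):
--         return False                                           # Not bijective
--     # Continuity of f
--     if not IsContinuous(f, X_open_sets, Y_open_sets):
--         return False
--     # Continuity of f⁻¹
--     f_inv = {v: k for k, v in f.items()}
--     if not IsContinuous(f_inv, Y_open_sets, X_open_sets):
--         return False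
--     return True                                               # Bijective + both continuous → homeo
-- ===== SOURCE B (Python) =====
-- def IsHomeomorphism(f, X_points, X_open_sets, Y_points, Y_open_sets):
--     # Bijectivity between the stated point sets
--     if set(f) != set(X_points) or set(f.values()) != set(Y_points):
--         return False
--     # Topologies, each converted to frozensets once
--     X_top = [frozenset(U) for U in X_open_sets]
--     Y_top = [frozenset(V) for V in Y_open_sets]
--     # Index y -> {x : f(x) = y}; preimage of V is the union of its buckets
--     fwd = {}
--     for x, y in f.items():
--         fwd.setdefault(y, set()).add(x)
--     if not all(frozenset(x for y in V for x in fwd.get(y, ())) in X_top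
--                for V in Y_open_sets):
--         return False
--     # Index x -> {y : f_inv(y) = x} (f_inv last-wins); preimage under f_inv of U
--     inv = {v: k for k, v in f.items()}
--     bwd = {}
--     for y, x in inv.items():
--         bwd.setdefault(x, set()).add(y)
--     return all(frozenset(y for x in U for y in bwd.get(x, ())) in Y_top
--                for U in X_open_sets)
-- ===== Notes on version B (the rewrite author's own statement) =====
-- stated objective: alternative
-- what changed: Replaces the two per-open-set filter scans of f (and A's rebuild of the frozenset topology list inside every membership test) with bucket indexes y->preimage points and x->image points built once, preimages formed as bucket unions, and both topologies converted to frozensets a single time.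
import Mathlib
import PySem

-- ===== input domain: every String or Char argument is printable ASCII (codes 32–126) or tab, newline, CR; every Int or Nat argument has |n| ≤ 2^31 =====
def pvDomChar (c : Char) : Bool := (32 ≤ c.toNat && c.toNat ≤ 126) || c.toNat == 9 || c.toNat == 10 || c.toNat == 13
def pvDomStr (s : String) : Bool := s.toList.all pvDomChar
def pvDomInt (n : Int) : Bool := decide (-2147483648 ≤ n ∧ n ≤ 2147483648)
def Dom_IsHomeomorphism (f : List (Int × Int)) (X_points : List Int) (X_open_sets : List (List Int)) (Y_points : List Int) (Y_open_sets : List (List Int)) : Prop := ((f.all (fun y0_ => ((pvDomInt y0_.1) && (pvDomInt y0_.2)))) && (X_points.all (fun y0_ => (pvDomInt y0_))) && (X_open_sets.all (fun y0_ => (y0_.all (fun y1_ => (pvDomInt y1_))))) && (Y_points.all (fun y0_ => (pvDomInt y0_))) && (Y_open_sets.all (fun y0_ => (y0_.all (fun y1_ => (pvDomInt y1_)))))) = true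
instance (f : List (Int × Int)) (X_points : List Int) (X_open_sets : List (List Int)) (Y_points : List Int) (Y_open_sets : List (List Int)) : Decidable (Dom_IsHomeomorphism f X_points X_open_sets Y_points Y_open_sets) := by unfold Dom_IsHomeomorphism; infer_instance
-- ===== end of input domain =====

-- B replaces A's per-open-set scans of f with bucket indexes built once and compares
-- against topologies converted to frozensets a single time (alternative decomposition).
-- ===== PORT A =====
def fsA (s : List Int) : PySem.Set Int := PySem.Set.ofList s

def isOpenA (U : List Int) (openSets : List (List Int)) : Bool :=
  (openSets.map (fun o => fsA o)).any (fun o => PySem.Set.equal (fsA U) o)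

def IsContinuousA (f : List (Int × Int)) (Xopen : List (List Int)) (Yopen : List (List Int)) : Bool :=
  Yopen.all (fun V =>
    let Vfs := fsA V
    let pre := PySem.Set.ofList ((f.filter (fun p => Vfs.contains p.2)).map Prod.fst)
    isOpenA pre Xopen)

def IsHomeomorphism (f : List (Int × Int)) (X_points : List Int) (X_open_sets : List (List Int)) (Y_points : List Int) (Y_open_sets : List (List Int)) : Bool :=
  let domain := PySem.Set.ofList (f.map Prod.fst)
  let codomain := PySem.Set.ofList (f.map Prod.snd)
  if !(PySem.Set.equal domain (fsA X_points)) || !(PySem.Set.equal codomain (fsA Y_points)) then false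
  else if !(IsContinuousA f X_open_sets Y_open_sets) then false
  else
    let f_inv := f.foldl (fun d p => d.insert p.2 p.1) PySem.Dict.empty
    if !(IsContinuousA f_inv.items Y_open_sets X_open_sets) then false
    else true

-- ===== PORT B =====
-- B: bucket indexes (key -> set of partners) built once; preimages are bucket unions;
-- topologies converted to frozensets once.
def bucketsB (l : List (Int × Int)) : PySem.Dict Int (PySem.Set Int) :=
  l.foldl (fun d p => d.modify p.2 [] (fun s => PySem.Set.add s p.1)) PySem.Dict.empty

def IsHomeomorphism_alt (f : List (Int × Int)) (X_points : List Int) (X_open_sets : List (List Int)) (Y_points : List Int) (Y_open_sets : List (List Int)) : Bool :=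
  if !(PySem.Set.equal (PySem.Set.ofList (f.map Prod.fst)) (PySem.Set.ofList X_points))
     || !(PySem.Set.equal (PySem.Set.ofList (f.map Prod.snd)) (PySem.Set.ofList Y_points)) then false
  else
    let Xtop := X_open_sets.map (fun U => PySem.Set.ofList U)
    let Ytop := Y_open_sets.map (fun V => PySem.Set.ofList V)
    let fwd := bucketsB f
    if !(Y_open_sets.all (fun V =>
          Xtop.any (fun o => PySem.Set.equal (PySem.Set.ofList (V.flatMap (fun y => fwd.getD y []))) o))) then false
    else
      let inv := f.foldl (fun d p => d.insert p.2 p.1) PySem.Dict.empty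
      let bwd := bucketsB inv.items
      X_open_sets.all (fun U =>
        Ytop.any (fun o => PySem.Set.equal (PySem.Set.ofList (U.flatMap (fun x => bwd.getD x []))) o))

-- ===== PRECONDITION & SPEC =====
def Spec_IsHomeomorphism (f : List (Int × Int)) (X_points : List Int) (X_open_sets : List (List Int)) (Y_points : List Int) (Y_open_sets : List (List Int)) (out : Bool) : Prop := out = IsHomeomorphism_alt f X_points X_open_sets Y_points Y_open_sets
instance (f : List (Int × Int)) (X_points : List Int) (X_open_sets : List (List Int)) (Y_points : List Int) (Y_open_sets : List (List Int)) (out : Bool) : Decidable (Spec_IsHomeomorphism f X_points X_open_sets Y_points Y_open_sets out) := by unfold Spec_IsHomeomorphism; infer_instance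

-- ===== CLAIM (what is proved, stated in full; the proofs are below) =====
def Claim_equal_IsHomeomorphism : Prop := ∀ (f : List (Int × Int)) (X_points : List Int) (X_open_sets : List (List Int)) (Y_points : List Int) (Y_open_sets : List (List Int)), Dom_IsHomeomorphism f X_points X_open_sets Y_points Y_open_sets → Spec_IsHomeomorphism f X_points X_open_sets Y_points Y_open_sets (IsHomeomorphism f X_points X_open_sets Y_points Y_open_sets)

-- ===== LEMMAS AND PROOFS =====
-- membership in a bucket of bucketsB
lemma mem_buckets_foldl (l : List (Int × Int)) (d : PySem.Dict Int (PySem.Set Int)) (y x : Int) :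
    x ∈ (l.foldl (fun d p => d.modify p.2 [] (fun s => PySem.Set.add s p.1)) d).getD y [] ↔
      x ∈ d.getD y [] ∨ (x, y) ∈ l := by
  induction l generalizing d with
  | nil => simp
  | cons p t ih =>
    simp only [List.foldl_cons, ih, PySem.Dict.getD_modify, List.mem_cons]
    by_cases h : y = p.2
    · subst h
      simp [PySem.Set.mem_add, Prod.ext_iff]
      try tauto
    · simp [h, Prod.ext_iff]
      try tauto

lemma mem_bucketsB (l : List (Int × Int)) (y x : Int) :
    x ∈ (bucketsB l).getD y [] ↔ (x, y) ∈ l := by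
  unfold bucketsB
  rw [mem_buckets_foldl]
  simp

-- the two preimage computations have the same members
lemma pre_members (l : List (Int × Int)) (V : List Int) (x : Int) :
    (x ∈ PySem.Set.ofList ((l.filter (fun p => (fsA V).contains p.2)).map Prod.fst) ↔
     x ∈ PySem.Set.ofList (V.flatMap (fun y => (bucketsB l).getD y []))) := by
  simp only [PySem.Set.mem_ofList, List.mem_map, List.mem_filter, List.mem_flatMap,
    mem_bucketsB, PySem.Set.contains_eq_listContains, fsA]
  constructor
  · rintro ⟨p, ⟨hp, hc⟩, rfl⟩
    exact ⟨p.2, by simpa [PySem.Set.mem_ofList] using hc, hp⟩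
  · rintro ⟨y, hy, hxy⟩
    exact ⟨(x, y), ⟨hxy, by simpa [PySem.Set.mem_ofList] using hy⟩, rfl⟩

-- Set.equal only depends on the members of its first argument
lemma equal_congr_left {s t o : PySem.Set Int} (h : ∀ x, x ∈ s ↔ x ∈ t) :
    PySem.Set.equal s o = PySem.Set.equal t o := by
  by_cases hs : PySem.Set.equal s o = true
  · rw [hs]
    symm
    rw [PySem.Set.equal_iff] at hs ⊢
    intro x
    rw [← h]
    exact hs x
  · have ht : ¬ (PySem.Set.equal t o = true) := by
      intro ht
      apply hs
      rw [PySem.Set.equal_iff] at ht ⊢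
      intro x
      rw [h]
      exact ht x
    rw [Bool.not_eq_true] at hs ht
    rw [hs, ht]

lemma all_congr' {α : Type} (l : List α) (p q : α → Bool) (h : ∀ a ∈ l, p a = q a) :
    l.all p = l.all q := by
  induction l with
  | nil => rfl
  | cons a t ih =>
    simp only [List.all_cons]
    rw [h a (List.mem_cons_self), ih (fun b hb => h b (List.mem_cons_of_mem _ hb))]

-- A's continuity loop equals B's bucket-union loop
lemma any_congr' {α : Type} (l : List α) (p q : α → Bool) (h : ∀ a ∈ l, p a = q a) :
    l.any p = l.any q := by
  induction l with
  | nil => rfl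
  | cons a t ih =>
    simp only [List.any_cons]
    rw [h a (List.mem_cons_self), ih (fun b hb => h b (List.mem_cons_of_mem _ hb))]

lemma continuity_eq (l : List (Int × Int)) (Xopen Yopen : List (List Int)) :
    IsContinuousA l Xopen Yopen =
      Yopen.all (fun V =>
        (Xopen.map (fun U => PySem.Set.ofList U)).any
          (fun o => PySem.Set.equal (PySem.Set.ofList (V.flatMap (fun y => (bucketsB l).getD y []))) o)) := by
  unfold IsContinuousA isOpenA
  simp only [fsA]
  apply all_congr'
  intro V _
  apply any_congr'
  intro o _
  apply equal_congr_left
  intro x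
  simpa [fsA, PySem.Set.mem_ofList] using pre_members l V x

-- ===== VERDICT (by name: the statement is the Claim_ definition above) =====
theorem IsHomeomorphism_spec : Claim_equal_IsHomeomorphism := by
  intro f Xp Xo Yp Yo _
  unfold Spec_IsHomeomorphism IsHomeomorphism IsHomeomorphism_alt
  simp only [fsA]
  rw [continuity_eq f Xo Yo,
      continuity_eq ((f.foldl (fun d p => d.insert p.2 p.1) PySem.Dict.empty).items) Yo Xo]
  generalize (!(PySem.Set.equal (PySem.Set.ofList (f.map Prod.fst)) (PySem.Set.ofList Xp))
      || !(PySem.Set.equal (PySem.Set.ofList (f.map Prod.snd)) (PySem.Set.ofList Yp))) = c1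
  generalize (Yo.all (fun V =>
      (Xo.map (fun U => PySem.Set.ofList U)).any
        (fun o => PySem.Set.equal (PySem.Set.ofList (V.flatMap (fun y => (bucketsB f).getD y []))) o))) = c2
  generalize (Xo.all (fun U =>
      (Yo.map (fun V => PySem.Set.ofList V)).any
        (fun o => PySem.Set.equal (PySem.Set.ofList (U.flatMap (fun x =>
          (bucketsB ((f.foldl (fun d p => d.insert p.2 p.1) PySem.Dict.empty).items)).getD x []))) o))) = c3
  cases c1 <;> cases c2 <;> cases c3 <;> simp
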